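-- pv_equiv track=rewrite | github.com/matthewdeanmartin/gizyskon | main.py | map_interpretation_A_tail_plus6_mod26
-- ===== SOURCE A (Python) =====
-- from typing import List, Optional, Tuple
--
-- def map_interpretation_A_tail_plus6_mod26(values: List[int]) -> List[int]:
--     # produce output values (1..26) under Interpretation A
--     out = []
--     tail = 0
--     # compute tails from end to start to avoid recomputing sums
--     for x in reversed(values):
--         tail += x
--         y = ((tail + 6 - 1) % 26) + 1
--         out.append(y)
--     return list(reversed(out))
-- ===== SOURCE B (Python) =====
-- def map_interpretation_A_tail_plus6_mod26(values):
--     # forward scan: suffix sum = total - prefix sum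
--     total = sum(values)
--     out = []
--     before = 0
--     for x in values:
--         out.append(((total - before + 5) % 26) + 1)
--         before += x
--     return out
-- ===== Notes on version B (the rewrite author's own statement) =====
-- stated objective: alternative
-- what changed: Replaces the backward running-suffix-sum with two reversals by a forward scan that precomputes the total and derives each suffix sum as total minus a running prefix sum, producing the output front-to-back with no reversal.
import Mathlib
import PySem

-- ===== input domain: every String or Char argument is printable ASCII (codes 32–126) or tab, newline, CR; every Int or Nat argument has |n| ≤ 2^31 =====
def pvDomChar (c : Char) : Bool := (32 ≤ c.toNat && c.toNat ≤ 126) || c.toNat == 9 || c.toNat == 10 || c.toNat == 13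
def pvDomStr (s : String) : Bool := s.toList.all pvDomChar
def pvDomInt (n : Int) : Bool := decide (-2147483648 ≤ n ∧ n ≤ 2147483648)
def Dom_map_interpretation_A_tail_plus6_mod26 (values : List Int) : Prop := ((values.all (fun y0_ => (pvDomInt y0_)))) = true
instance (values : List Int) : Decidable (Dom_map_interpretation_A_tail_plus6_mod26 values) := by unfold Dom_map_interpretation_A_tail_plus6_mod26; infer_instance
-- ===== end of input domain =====

-- B replaces A's backward suffix-sum accumulation (with two reversals) by a forward
-- scan using total-minus-prefix; objective: alternative decomposition, same cost.

-- ===== PORT A =====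
-- literal transliteration: fold over reversed values accumulating (tail, out), then reverse out
def map_interpretation_A_tail_plus6_mod26 (values : List Int) : List Int :=
  let r := values.reverse.foldl
    (fun (s : Int × List Int) x =>
      let tail := s.1 + x
      let y := PySem.Int.mod (tail + 6 - 1) 26 + 1
      (tail, s.2 ++ [y]))
    (0, [])
  r.2.reverse

-- ===== PORT B =====
-- forward loop with running prefix sum `before`
def pvAltGo (total before : Int) : List Int → List Int
  | [] => []
  | x :: xs => (PySem.Int.mod (total - before + 5) 26 + 1) :: pvAltGo total (before + x) xs

def map_interpretation_A_tail_plus6_mod26_alt (values : List Int) : List Int :=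
  let total := values.foldl (· + ·) 0
  pvAltGo total 0 values

-- ===== PRECONDITION & SPEC =====
def Spec_map_interpretation_A_tail_plus6_mod26 (values : List Int) (out : List Int) : Prop := out = map_interpretation_A_tail_plus6_mod26_alt values
instance (values : List Int) (out : List Int) : Decidable (Spec_map_interpretation_A_tail_plus6_mod26 values out) := by unfold Spec_map_interpretation_A_tail_plus6_mod26; infer_instance

-- ===== CLAIM (what is proved, stated in full; the proofs are below) =====
def Claim_equal_map_interpretation_A_tail_plus6_mod26 : Prop := ∀ (values : List Int), Dom_map_interpretation_A_tail_plus6_mod26 values → Spec_map_interpretation_A_tail_plus6_mod26 values (map_interpretation_A_tail_plus6_mod26 values)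

-- ===== LEMMAS AND PROOFS =====

-- common specification: map each suffix sum s to mod(s+5,26)+1
def pvSuffixSpec : List Int → List Int
  | [] => []
  | x :: xs => (PySem.Int.mod (x + xs.sum + 5) 26 + 1) :: pvSuffixSpec xs

def pvStepA (s : Int × List Int) (x : Int) : Int × List Int :=
  let tail := s.1 + x
  (tail, s.2 ++ [PySem.Int.mod (tail + 6 - 1) 26 + 1])

lemma pvFoldA_fst (l : List Int) (t : Int) (acc : List Int) :
    (l.foldl pvStepA (t, acc)).1 = t + l.sum := by
  induction l generalizing t acc with
  | nil => simp
  | cons x xs ih => simp [pvStepA, ih, add_assoc]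

lemma pvA_eq_spec (values : List Int) :
    map_interpretation_A_tail_plus6_mod26 values = pvSuffixSpec values := by
  induction values with
  | nil => rfl
  | cons x xs ih =>
    show ((x :: xs).reverse.foldl pvStepA (0, [])).2.reverse = _
    rw [List.reverse_cons, List.foldl_append]
    have h1 : (xs.reverse.foldl pvStepA (0, [])).1 = xs.sum := by
      simpa using pvFoldA_fst xs.reverse 0 []
    simp only [List.foldl_cons, List.foldl_nil, pvStepA, h1]
    rw [List.reverse_append, pvSuffixSpec]
    have h2 : ((xs.reverse.foldl pvStepA (0, [])).2).reverse = pvSuffixSpec xs := ih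
    have h3 : xs.sum + x + 6 - 1 = x + xs.sum + 5 := by ring
    simp only [List.reverse_cons, List.reverse_nil, List.nil_append, List.singleton_append, h2, h3]

lemma pvAltGo_eq_spec (xs : List Int) (before : Int) :
    pvAltGo (before + xs.sum) before xs = pvSuffixSpec xs := by
  induction xs generalizing before with
  | nil => rfl
  | cons x xs ih =>
    simp only [pvAltGo, pvSuffixSpec, List.sum_cons]
    rw [show before + (x + xs.sum) - before + 5 = x + xs.sum + 5 by ring,
        show before + (x + xs.sum) = (before + x) + xs.sum by ring, ih]

lemma pvB_eq_spec (values : List Int) :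
    map_interpretation_A_tail_plus6_mod26_alt values = pvSuffixSpec values := by
  show pvAltGo (values.foldl (· + ·) 0) 0 values = _
  have h : values.foldl (· + ·) 0 = (0 : Int) + values.sum := by
    simp [List.sum_eq_foldl]
  rw [h]
  exact pvAltGo_eq_spec values 0

-- ===== VERDICT (by name: the statement is the Claim_ definition above) =====
theorem map_interpretation_A_tail_plus6_mod26_spec : Claim_equal_map_interpretation_A_tail_plus6_mod26 := by
  intro values _
  show map_interpretation_A_tail_plus6_mod26 values = map_interpretation_A_tail_plus6_mod26_alt values
  rw [pvA_eq_spec, pvB_eq_spec]
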